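-- pv_equiv track=rewrite | github.com/manoharb30/corporate-intelligence | backend/app/services/trade_classifier.py | classify_trades_batch
-- ===== SOURCE A (Python) =====
-- _SIMPLE_CODE_MAP = {
--     "P": "buy",
--     "S": "sell",
--     "A": "award",
--     "D": "disposition",
--     "G": "gift",
--     "C": "conversion",
--     "W": "will",
-- }
--
-- def classify_trade(code: str, same_day_codes: set[str] | None = None) -> str:
--     """Classify a single transaction code into a trade type.
--
--     Args:
--         code: SEC transaction code (P, S, M, A, F, D, G, C, W)
--         same_day_codes: Set of all transaction codes for the same (person, date).
--                         Required for M and F codes to determine context.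
--
--     Returns:
--         Trade type string: buy, sell, exercise_hold, exercise_sell, award,
--         tax, disposition, gift, conversion, will, or other.
--     """
--     code = (code or "").strip().upper()
--
--     if code in _SIMPLE_CODE_MAP:
--         return _SIMPLE_CODE_MAP[code]
--
--     if code == "M":
--         if same_day_codes and "S" in same_day_codes:
--             return "exercise_sell"
--         return "exercise_hold"
--
--     if code == "F":
--         # F alone = tax withholding; F with M = part of exercise (M classifies itself)
--         return "tax"
--
--     return "other"
--
-- def classify_trades_batch(
--     trades: list[dict],
--     name_key: str = "insider_name",
--     date_key: str = "transaction_date",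
--     code_key: str = "transaction_code",
-- ) -> list[str]:
--     """Classify a batch of trades, using same-day grouping for context.
--
--     Groups trades by (person, date) to build code sets, then classifies
--     each trade individually using that context.
--
--     Args:
--         trades: List of trade dicts.
--         name_key: Key for insider name in each dict.
--         date_key: Key for transaction date in each dict.
--         code_key: Key for transaction code in each dict.
--
--     Returns:
--         List of trade_type strings, one per input trade, in the same order.
--     """
--     # Build {(name, date): set_of_codes} index
--     group_codes: dict[tuple[str, str], set[str]] = {}
--     for t in trades:
--         name = (t.get(name_key) or "").strip().upper()
--         date = (t.get(date_key) or "").strip()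
--         code = (t.get(code_key) or "").strip().upper()
--         if name and date and code:
--             key = (name, date)
--             if key not in group_codes:
--                 group_codes[key] = set()
--             group_codes[key].add(code)
--
--     # Classify each trade
--     result = []
--     for t in trades:
--         name = (t.get(name_key) or "").strip().upper()
--         date = (t.get(date_key) or "").strip()
--         code = (t.get(code_key) or "").strip().upper()
--         same_day = group_codes.get((name, date))
--         result.append(classify_trade(code, same_day))
--
--     return result
-- ===== SOURCE B (Python) =====
-- _SIMPLE_CODE_MAP = {
--     "P": "buy",
--     "S": "sell",
--     "A": "award",
--     "D": "disposition",
--     "G": "gift",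
--     "C": "conversion",
--     "W": "will",
-- }
--
-- def classify_trades_batch(
--     trades: list[dict],
--     name_key: str = "insider_name",
--     date_key: str = "transaction_date",
--     code_key: str = "transaction_code",
-- ) -> list[str]:
--     # Online single pass: classify each trade immediately (M provisionally as
--     # exercise_hold), while recording the positions of fully-keyed M trades and
--     # the set of (name, date) keys that carry a valid S trade.  A tiny fixup
--     # pass then upgrades exactly those pending M positions whose key saw an S.
--     result = []
--     pending = []   # (index, (name, date)) of M trades that may need upgrading
--     s_keys = set()
--     for i, t in enumerate(trades):
--         name = (t.get(name_key) or "").strip().upper()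
--         date = (t.get(date_key) or "").strip()
--         code = (t.get(code_key) or "").strip().upper()
--         if code in _SIMPLE_CODE_MAP:
--             result.append(_SIMPLE_CODE_MAP[code])
--             if code == "S" and name and date:
--                 s_keys.add((name, date))
--         elif code == "M":
--             result.append("exercise_hold")
--             if name and date:
--                 pending.append((i, (name, date)))
--         elif code == "F":
--             result.append("tax")
--         else:
--             result.append("other")
--     for i, key in pending:
--         if key in s_keys:
--             result[i] = "exercise_sell"
--     return result
-- ===== Notes on version B (the rewrite author's own statement) =====
-- stated objective: alternative
-- what changed: A makes two full passes (build a {(name,date): set_of_codes} index, then classify every trade against its group's code set); B makes one online pass that classifies each trade immediately (M provisionally as exercise_hold) while collecting the positions of pending M trades and the keys that saw a valid S trade, then a small fixup pass patches only those pending positions to exercise_sell.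
import Mathlib
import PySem

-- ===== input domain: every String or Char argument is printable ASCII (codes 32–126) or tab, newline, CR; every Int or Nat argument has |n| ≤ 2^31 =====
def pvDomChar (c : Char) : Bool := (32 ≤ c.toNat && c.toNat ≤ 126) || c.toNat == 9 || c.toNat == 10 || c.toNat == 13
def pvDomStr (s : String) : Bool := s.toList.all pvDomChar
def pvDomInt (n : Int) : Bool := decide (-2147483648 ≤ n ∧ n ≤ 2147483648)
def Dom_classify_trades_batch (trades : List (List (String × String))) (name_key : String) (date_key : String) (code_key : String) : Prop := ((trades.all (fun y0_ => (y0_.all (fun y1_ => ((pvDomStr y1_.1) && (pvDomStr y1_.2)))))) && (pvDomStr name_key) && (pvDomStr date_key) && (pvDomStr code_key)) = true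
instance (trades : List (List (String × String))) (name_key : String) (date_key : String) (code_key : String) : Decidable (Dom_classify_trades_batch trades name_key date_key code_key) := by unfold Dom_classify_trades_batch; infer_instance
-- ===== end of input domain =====

-- B replaces A's two full passes (per-(name,date) code-set index, then classify every trade
-- against its group's set) by one online pass that classifies immediately (M provisionally as
-- "exercise_hold") while recording pending M positions and the keys with a valid "S" trade,
-- plus a small fixup pass that patches only the pending positions; same outputs.

-- ===== PORT A =====
-- (t.get(k) or ""): values are strings, so `or ""` only turns a missing key into ""
def pvField (t : List (String × String)) (k : String) : String :=
  ((PySem.Dict.mk t).get? k).getD ""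

-- normalized field reads: '(t.get(k) or "").strip().upper()' (name, code) and '(… or "").strip()' (date)
def pvNormUpper (t : List (String × String)) (k : String) : String :=
  PySem.Str.upper (PySem.Str.strip (pvField t k))
def pvNormStrip (t : List (String × String)) (k : String) : String :=
  PySem.Str.strip (pvField t k)

def pvSimpleCodeMap : PySem.Dict String String :=
  PySem.Dict.mk [("P","buy"),("S","sell"),("A","award"),("D","disposition"),("G","gift"),("C","conversion"),("W","will")]

-- Python truthiness of 'same_day_codes and "S" in same_day_codes'
def pvTruthyS (o : Option (PySem.Set String)) : Bool :=
  match o with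
  | some s => !s.isEmpty && PySem.Set.contains s "S"
  | none => false

def classify_trade (code : String) (same_day_codes : Option (PySem.Set String)) : String :=
  let code := PySem.Str.upper (PySem.Str.strip code)
  match pvSimpleCodeMap.get? code with
  | some v => v
  | none =>
    if code = "M" then
      if pvTruthyS same_day_codes then "exercise_sell"
      else "exercise_hold"
    else if code = "F" then "tax"
    else "other"

-- one iteration of A's first loop (build {(name,date): set_of_codes})
def pvStepA (name_key date_key code_key : String)
    (gc : PySem.Dict (String × String) (PySem.Set String)) (t : List (String × String)) :
    PySem.Dict (String × String) (PySem.Set String) :=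
  if pvNormUpper t name_key ≠ "" ∧ pvNormStrip t date_key ≠ "" ∧ pvNormUpper t code_key ≠ "" then
    (if gc.contains (pvNormUpper t name_key, pvNormStrip t date_key) then gc
     else gc.insert (pvNormUpper t name_key, pvNormStrip t date_key) PySem.Set.empty).modify
      (pvNormUpper t name_key, pvNormStrip t date_key) PySem.Set.empty
      (fun s => PySem.Set.add s (pvNormUpper t code_key))
  else gc

def classify_trades_batch (trades : List (List (String × String))) (name_key : String) (date_key : String) (code_key : String) : List String :=
  let group_codes := trades.foldl (pvStepA name_key date_key code_key) PySem.Dict.empty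
  trades.foldl (fun result t =>
    result ++ [classify_trade (pvNormUpper t code_key)
      (group_codes.get? (pvNormUpper t name_key, pvNormStrip t date_key))]) []

-- ===== PORT B =====
-- one iteration of B's single online pass over enumerate(trades):
-- state = (result so far, pending M positions with their keys, keys that saw a valid "S")
def pvStepB (name_key date_key code_key : String)
    (st : List String × List (Int × (String × String)) × PySem.Set (String × String))
    (p : Int × List (String × String)) :
    List String × List (Int × (String × String)) × PySem.Set (String × String) :=
  let name := pvNormUpper p.2 name_key
  let date := pvNormStrip p.2 date_key
  let code := pvNormUpper p.2 code_key
  match pvSimpleCodeMap.get? code with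
  | some v =>
    (st.1 ++ [v], st.2.1,
     if code = "S" ∧ name ≠ "" ∧ date ≠ "" then PySem.Set.add st.2.2 (name, date) else st.2.2)
  | none =>
    if code = "M" then
      (st.1 ++ ["exercise_hold"],
       if name ≠ "" ∧ date ≠ "" then st.2.1 ++ [(p.1, (name, date))] else st.2.1,
       st.2.2)
    else if code = "F" then (st.1 ++ ["tax"], st.2.1, st.2.2)
    else (st.1 ++ ["other"], st.2.1, st.2.2)

def classify_trades_batch_alt (trades : List (List (String × String))) (name_key : String) (date_key : String) (code_key : String) : List String :=
  let st := (PySem.List.enumerate trades 0).foldl (pvStepB name_key date_key code_key) ([], [], PySem.Set.empty)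
  -- fixup pass: 'for i, key in pending: if key in s_keys: result[i] = "exercise_sell"'
  st.2.1.foldl (fun res p =>
    if PySem.Set.contains st.2.2 p.2 then PySem.List.pySetD res p.1 "exercise_sell" else res) st.1

-- ===== PRECONDITION & SPEC =====
def Spec_classify_trades_batch (trades : List (List (String × String))) (name_key : String) (date_key : String) (code_key : String) (out : List String) : Prop := out = classify_trades_batch_alt trades name_key date_key code_key
instance (trades : List (List (String × String))) (name_key : String) (date_key : String) (code_key : String) (out : List String) : Decidable (Spec_classify_trades_batch trades name_key date_key code_key out) := by unfold Spec_classify_trades_batch; infer_instance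

-- ===== CLAIM (what is proved, stated in full; the proofs are below) =====
def Claim_equal_classify_trades_batch : Prop := ∀ (trades : List (List (String × String))) (name_key : String) (date_key : String) (code_key : String), Dom_classify_trades_batch trades name_key date_key code_key → Spec_classify_trades_batch trades name_key date_key code_key (classify_trades_batch trades name_key date_key code_key)

-- ===== LEMMAS AND PROOFS =====

-- proof-side shorthands -------------------------------------------------------

-- context-free classification (what B's first pass writes)
def pvG (_nk _dk ck : String) (t : List (String × String)) : String :=
  match pvSimpleCodeMap.get? (pvNormUpper t ck) with
  | some v => v
  | none =>
    if pvNormUpper t ck = "M" then "exercise_hold"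
    else if pvNormUpper t ck = "F" then "tax"
    else "other"

-- the intended classification given the set of keys holding a valid "S"
def pvT (nk dk ck : String) (sk : PySem.Set (String × String)) (t : List (String × String)) : String :=
  match pvSimpleCodeMap.get? (pvNormUpper t ck) with
  | some v => v
  | none =>
    if pvNormUpper t ck = "M" then
      if PySem.Set.contains sk (pvNormUpper t nk, pvNormStrip t dk) then "exercise_sell"
      else "exercise_hold"
    else if pvNormUpper t ck = "F" then "tax"
    else "other"

-- the "S"-key set B accumulates, as a standalone fold step
def pvSkStep (nk dk ck : String) (sk : PySem.Set (String × String)) (t : List (String × String)) :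
    PySem.Set (String × String) :=
  if pvNormUpper t ck = "S" ∧ pvNormUpper t nk ≠ "" ∧ pvNormStrip t dk ≠ "" then
    PySem.Set.add sk (pvNormUpper t nk, pvNormStrip t dk)
  else sk

-- the pending list B accumulates
def pvPendOf (nk dk ck : String) (s : Int) (ts : List (List (String × String))) :
    List (Int × (String × String)) :=
  (PySem.List.enumerate ts s).filterMap (fun p =>
    if pvNormUpper p.2 ck = "M" ∧ pvNormUpper p.2 nk ≠ "" ∧ pvNormStrip p.2 dk ≠ "" then
      some (p.1, (pvNormUpper p.2 nk, pvNormStrip p.2 dk))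
    else none)

-- the fixup step
def pvPatch (sk : PySem.Set (String × String)) (res : List String) (p : Int × (String × String)) :
    List String :=
  if PySem.Set.contains sk p.2 then PySem.List.pySetD res p.1 "exercise_sell" else res

-- literal facts about the simple-code map
lemma pv_get_M : pvSimpleCodeMap.get? "M" = none := by decide
lemma pv_get_S : pvSimpleCodeMap.get? "S" = some "sell" := by decide

-- string lemmas (normalization is idempotent) ---------------------------------

lemma pv_charLe (a b : Char) : (a ≤ b) ↔ a.toNat ≤ b.toNat := by
  rw [Char.le_def, UInt32.le_iff_toNat_le]; rfl

lemma pv_isspace_ascii_false {c : Char} (h1 : 65 ≤ c.toNat) (h2 : c.toNat ≤ 122) :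
    PySem.Chars.isspace c = false := by
  unfold PySem.Chars.isspace
  simp only [Bool.or_eq_false_iff, Bool.and_eq_false_iff, decide_eq_false_iff_not]
  omega

lemma pv_islower_bounds {c : Char} (h : PySem.Chars.islower c = true) :
    97 ≤ c.toNat ∧ c.toNat ≤ 122 := by
  unfold PySem.Chars.islower at h
  simp only [Bool.and_eq_true, decide_eq_true_eq, pv_charLe] at h
  have ha : ('a' : Char).toNat = 97 := rfl
  have hz : ('z' : Char).toNat = 122 := rfl
  omega

lemma pv_toNat_upperChar {c : Char} (h : PySem.Chars.islower c = true) :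
    (Char.ofNat (c.toNat - 32)).toNat = c.toNat - 32 := by
  have h1 := pv_islower_bounds h
  have hval : Nat.isValidChar (c.toNat - 32) := Or.inl (by omega)
  unfold Char.ofNat
  rw [dif_pos hval]
  unfold Char.ofNatAux Char.toNat
  simp

lemma pv_isspace_upperChar (c : Char) :
    PySem.Chars.isspace (PySem.Chars.upperChar c) = PySem.Chars.isspace c := by
  unfold PySem.Chars.upperChar
  by_cases hlow : PySem.Chars.islower c = true
  · rw [if_pos hlow]
    have h1 := pv_islower_bounds hlow
    have hv := pv_toNat_upperChar hlow
    rw [pv_isspace_ascii_false (c := Char.ofNat (c.toNat - 32)) (by omega) (by omega),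
      pv_isspace_ascii_false (c := c) (by omega) (by omega)]
  · rw [if_neg hlow]

lemma pv_upperChar_idem (c : Char) :
    PySem.Chars.upperChar (PySem.Chars.upperChar c) = PySem.Chars.upperChar c := by
  by_cases hlow : PySem.Chars.islower c = true
  · have h1 := pv_islower_bounds hlow
    have hv := pv_toNat_upperChar hlow
    have hup : PySem.Chars.upperChar c = Char.ofNat (c.toNat - 32) := by
      unfold PySem.Chars.upperChar; rw [if_pos hlow]
    have hlow2 : PySem.Chars.islower (Char.ofNat (c.toNat - 32)) = false := by
      rw [Bool.eq_false_iff]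
      intro hc
      have := pv_islower_bounds hc
      omega
    rw [hup]
    unfold PySem.Chars.upperChar
    simp [hlow2]
  · have : PySem.Chars.upperChar c = c := by
      unfold PySem.Chars.upperChar; rw [if_neg hlow]
    rw [this]; exact this

lemma pv_upper_idem (l : List Char) :
    PySem.Chars.upper (PySem.Chars.upper l) = PySem.Chars.upper l := by
  unfold PySem.Chars.upper
  rw [List.map_map]
  apply List.map_congr_left
  intro c _
  exact pv_upperChar_idem c

lemma pv_strip_upper_comm (l : List Char) :
    PySem.Chars.strip (PySem.Chars.upper l) = PySem.Chars.upper (PySem.Chars.strip l) := by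
  have hps : (PySem.Chars.isspace ∘ PySem.Chars.upperChar) = PySem.Chars.isspace :=
    funext pv_isspace_upperChar
  unfold PySem.Chars.strip PySem.Chars.lstrip PySem.Chars.rstrip PySem.Chars.upper
  rw [List.dropWhile_map, hps, ← List.map_reverse, List.dropWhile_map, hps, ← List.map_reverse]

lemma pv_dropWhile_prefix_self {p : Char → Bool} {w l : List Char}
    (hw : w <+: l) (hl : l.dropWhile p = l) : w.dropWhile p = w := by
  cases w with
  | nil => rfl
  | cons a w' =>
    obtain ⟨tl, htl⟩ := hw
    have hpa : p a = false := by
      by_contra hpc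
      have hpa' : p a = true := by revert hpc; cases p a <;> simp
      rw [← htl] at hl
      simp only [List.cons_append, List.dropWhile_cons, hpa', if_true] at hl
      have hlen := congrArg List.length hl
      rw [List.length_cons] at hlen
      have hle := List.length_dropWhile_le p (w' ++ tl)
      omega
    simp [hpa]

lemma pv_strip_idem (l : List Char) :
    PySem.Chars.strip (PySem.Chars.strip l) = PySem.Chars.strip l := by
  unfold PySem.Chars.strip
  set z := PySem.Chars.lstrip l with hz
  have hzl : z.dropWhile PySem.Chars.isspace = z := by
    rw [hz]; unfold PySem.Chars.lstrip; exact List.dropWhile_idempotent _ _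
  have hpre : PySem.Chars.rstrip z <+: z := by
    unfold PySem.Chars.rstrip
    have hsuf : List.dropWhile PySem.Chars.isspace z.reverse <:+ z.reverse :=
      List.dropWhile_suffix _
    have h2 := List.reverse_prefix.mpr hsuf
    simpa using h2
  have h1 : PySem.Chars.lstrip (PySem.Chars.rstrip z) = PySem.Chars.rstrip z := by
    unfold PySem.Chars.lstrip
    exact pv_dropWhile_prefix_self hpre hzl
  rw [h1]
  unfold PySem.Chars.rstrip
  rw [List.reverse_reverse, List.dropWhile_idempotent]

lemma pv_norm_idem (s : String) :
    PySem.Str.upper (PySem.Str.strip (PySem.Str.upper (PySem.Str.strip s))) =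
      PySem.Str.upper (PySem.Str.strip s) := by
  unfold PySem.Str.upper PySem.Str.strip
  simp only [String.toList_ofList]
  rw [pv_strip_upper_comm, pv_strip_idem, pv_upper_idem]

-- A-side: the dict of code sets seen through '"S" ∈ ·' ------------------------

lemma pv_getD_ensure (gc : PySem.Dict (String × String) (PySem.Set String))
    (key k : String × String) :
    ((if gc.contains key then gc else gc.insert key PySem.Set.empty).getD k PySem.Set.empty)
      = gc.getD k PySem.Set.empty := by
  cases hc : gc.contains key with
  | true => simp
  | false =>
    simp only [Bool.false_eq_true, if_false, PySem.Dict.getD_insert]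
    split_ifs with hk
    · subst hk
      rw [PySem.Dict.getD_of_not_contains gc PySem.Set.empty hc]
    · rfl

lemma pv_stepA_S (nk dk ck : String) (gc : PySem.Dict (String × String) (PySem.Set String))
    (t : List (String × String)) (k : String × String) :
    ("S" ∈ (pvStepA nk dk ck gc t).getD k PySem.Set.empty) ↔
      ("S" ∈ gc.getD k PySem.Set.empty ∨
        (pvNormUpper t nk ≠ "" ∧ pvNormStrip t dk ≠ "" ∧ pvNormUpper t ck = "S" ∧ k = (pvNormUpper t nk, pvNormStrip t dk))) := by
  unfold pvStepA
  by_cases hv : pvNormUpper t nk ≠ "" ∧ pvNormStrip t dk ≠ "" ∧ pvNormUpper t ck ≠ ""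
  · rw [if_pos hv, PySem.Dict.getD_modify]
    by_cases hk : k = (pvNormUpper t nk, pvNormStrip t dk)
    · rw [if_pos hk, pv_getD_ensure, PySem.Set.mem_add, hk]
      constructor
      · rintro (hs | hs)
        · exact Or.inl hs
        · exact Or.inr ⟨hv.1, hv.2.1, hs.symm, rfl⟩
      · rintro (hs | hs)
        · exact Or.inl hs
        · exact Or.inr hs.2.2.1.symm
    · rw [if_neg hk, pv_getD_ensure]
      constructor
      · exact Or.inl
      · rintro (hs | hs)
        · exact hs
        · exact absurd hs.2.2.2 hk
  · rw [if_neg hv]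
    constructor
    · exact Or.inl
    · rintro (hs | hs)
      · exact hs
      · refine absurd ⟨hs.1, hs.2.1, ?_⟩ hv
        rw [hs.2.2.1]
        decide

lemma pv_skStep_mem (nk dk ck : String) (sk : PySem.Set (String × String))
    (t : List (String × String)) (k : String × String) :
    (k ∈ pvSkStep nk dk ck sk t) ↔
      (k ∈ sk ∨
        (pvNormUpper t nk ≠ "" ∧ pvNormStrip t dk ≠ "" ∧ pvNormUpper t ck = "S" ∧ k = (pvNormUpper t nk, pvNormStrip t dk))) := by
  unfold pvSkStep
  by_cases hv : pvNormUpper t ck = "S" ∧ pvNormUpper t nk ≠ "" ∧ pvNormStrip t dk ≠ ""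
  · rw [if_pos hv, PySem.Set.mem_add]
    constructor
    · rintro (hs | hs)
      · exact Or.inl hs
      · exact Or.inr ⟨hv.2.1, hv.2.2, hv.1, hs⟩
    · rintro (hs | hs)
      · exact Or.inl hs
      · exact Or.inr hs.2.2.2
  · rw [if_neg hv]
    constructor
    · exact Or.inl
    · rintro (hs | hs)
      · exact hs
      · exact absurd ⟨hs.2.2.1, hs.1, hs.2.1⟩ hv

-- loop invariant: "S" lives in A's code set at key k  ⟺  k is in the "S"-key set
lemma pv_inv (nk dk ck : String) (ts : List (List (String × String)))
    (gc : PySem.Dict (String × String) (PySem.Set String)) (sk : PySem.Set (String × String))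
    (h : ∀ k, "S" ∈ gc.getD k PySem.Set.empty ↔ k ∈ sk) :
    ∀ k, "S" ∈ (ts.foldl (pvStepA nk dk ck) gc).getD k PySem.Set.empty ↔
      k ∈ ts.foldl (pvSkStep nk dk ck) sk := by
  induction ts generalizing gc sk with
  | nil => simpa using h
  | cons t ts ih =>
    simp only [List.foldl_cons]
    apply ih
    intro k
    rw [pv_stepA_S, pv_skStep_mem, h k]

-- the truthiness test A runs on the looked-up set equals key-membership in the "S"-key set
lemma pv_cond (gc : PySem.Dict (String × String) (PySem.Set String))
    (sk : PySem.Set (String × String))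
    (h : ∀ k, "S" ∈ gc.getD k PySem.Set.empty ↔ k ∈ sk) (key : String × String) :
    pvTruthyS (gc.get? key) = PySem.Set.contains sk key := by
  have hk := h key
  unfold pvTruthyS
  cases hq : gc.get? key with
  | none =>
    rw [PySem.Dict.getD_of_get?_eq_none gc PySem.Set.empty hq] at hk
    show false = PySem.Set.contains sk key
    symm
    rw [Bool.eq_false_iff]
    intro hc
    have hm := (PySem.Set.contains_iff sk key).mp hc
    have : ("S" : String) ∈ (PySem.Set.empty : PySem.Set String) := hk.mpr hm
    simp [PySem.Set.empty] at this
  | some s =>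
    rw [PySem.Dict.getD_of_get?_eq_some gc PySem.Set.empty hq] at hk
    show (!s.isEmpty && PySem.Set.contains s "S") = PySem.Set.contains sk key
    by_cases hs : ("S" : String) ∈ s
    · have h1 : PySem.Set.contains s "S" = true := (PySem.Set.contains_iff s "S").mpr hs
      have h2 : s.isEmpty = false := by
        cases s with
        | nil => simp at hs
        | cons a l => rfl
      have h3 : PySem.Set.contains sk key = true :=
        (PySem.Set.contains_iff sk key).mpr (hk.mp hs)
      rw [h1, h2, h3]
      rfl
    · have h1 : PySem.Set.contains s "S" = false := by
        rw [Bool.eq_false_iff]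
        intro hc
        exact hs ((PySem.Set.contains_iff s "S").mp hc)
      have h3 : PySem.Set.contains sk key = false := by
        rw [Bool.eq_false_iff]
        intro hc
        exact hs (hk.mpr ((PySem.Set.contains_iff sk key).mp hc))
      rw [h1, h3, Bool.and_false]

-- A's per-trade value equals pvT of the "S"-key set
lemma pv_point (nk dk ck : String) (gc : PySem.Dict (String × String) (PySem.Set String))
    (sk : PySem.Set (String × String))
    (h : ∀ k, "S" ∈ gc.getD k PySem.Set.empty ↔ k ∈ sk) (t : List (String × String)) :
    classify_trade (pvNormUpper t ck) (gc.get? (pvNormUpper t nk, pvNormStrip t dk)) =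
      pvT nk dk ck sk t := by
  have hidem : PySem.Str.upper (PySem.Str.strip (pvNormUpper t ck)) = pvNormUpper t ck := by
    unfold pvNormUpper
    exact pv_norm_idem (pvField t ck)
  unfold classify_trade pvT
  simp only [hidem]
  cases hq : pvSimpleCodeMap.get? (pvNormUpper t ck) with
  | some v => rfl
  | none =>
    show (if pvNormUpper t ck = "M" then
            if pvTruthyS (gc.get? (pvNormUpper t nk, pvNormStrip t dk)) then "exercise_sell"
            else "exercise_hold"
          else if pvNormUpper t ck = "F" then "tax"
          else "other")
        = (if pvNormUpper t ck = "M" then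
            if PySem.Set.contains sk (pvNormUpper t nk, pvNormStrip t dk) then "exercise_sell"
            else "exercise_hold"
          else if pvNormUpper t ck = "F" then "tax"
          else "other")
    rw [pv_cond gc sk h (pvNormUpper t nk, pvNormStrip t dk)]

-- A's output is the pvT-map of the trades
lemma pv_A_map (trades : List (List (String × String))) (nk dk ck : String) :
    classify_trades_batch trades nk dk ck =
      trades.map (pvT nk dk ck (trades.foldl (pvSkStep nk dk ck) PySem.Set.empty)) := by
  unfold classify_trades_batch
  rw [PySem.List.foldl_append_singleton_eq_map]
  rw [List.nil_append]
  apply List.map_congr_left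
  intro t _
  exact pv_point nk dk ck _ _
    (pv_inv nk dk ck trades PySem.Dict.empty PySem.Set.empty
      (by
        intro k
        rw [PySem.Dict.getD_empty]
        simp [PySem.Set.empty]))
    t

-- B-side: characterization of the single pass ---------------------------------

lemma pv_pend_cons (nk dk ck : String) (s : Int) (t : List (String × String))
    (ts : List (List (String × String))) :
    pvPendOf nk dk ck s (t :: ts) =
      (if pvNormUpper t ck = "M" ∧ pvNormUpper t nk ≠ "" ∧ pvNormStrip t dk ≠ "" then
        [(s, (pvNormUpper t nk, pvNormStrip t dk))]
      else []) ++ pvPendOf nk dk ck (s + 1) ts := by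
  unfold pvPendOf
  rw [PySem.List.enumerate_cons, List.filterMap_cons]
  split_ifs with h
  · simp [h]
  · simp [h]

lemma pv_loopB (nk dk ck : String) (ts : List (List (String × String))) :
    ∀ (s : Int) (res : List String) (pend : List (Int × (String × String)))
      (sk : PySem.Set (String × String)),
    (PySem.List.enumerate ts s).foldl (pvStepB nk dk ck) (res, pend, sk) =
      (res ++ ts.map (pvG nk dk ck), pend ++ pvPendOf nk dk ck s ts,
        ts.foldl (pvSkStep nk dk ck) sk) := by
  induction ts with
  | nil =>
    intro s res pend sk
    simp [pvPendOf, PySem.List.enumerate_nil]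
  | cons t ts ih =>
    intro s res pend sk
    rw [PySem.List.enumerate_cons, List.foldl_cons, pv_pend_cons]
    have hstep : pvStepB nk dk ck (res, pend, sk) (s, t) =
        (res ++ [pvG nk dk ck t],
         pend ++ (if pvNormUpper t ck = "M" ∧ pvNormUpper t nk ≠ "" ∧ pvNormStrip t dk ≠ "" then
            [(s, (pvNormUpper t nk, pvNormStrip t dk))] else []),
         pvSkStep nk dk ck sk t) := by
      unfold pvStepB pvG pvSkStep
      cases hq : pvSimpleCodeMap.get? (pvNormUpper t ck) with
      | some v =>
        have hM : pvNormUpper t ck ≠ "M" := by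
          intro h; rw [h, pv_get_M] at hq; cases hq
        simp only [hq]
        by_cases hS : pvNormUpper t ck = "S" ∧ pvNormUpper t nk ≠ "" ∧ pvNormStrip t dk ≠ ""
        · simp [hS, hM]
        · simp [hS, hM]
      | none =>
        have hS : ¬ (pvNormUpper t ck = "S" ∧ pvNormUpper t nk ≠ "" ∧ pvNormStrip t dk ≠ "") := by
          intro h; rw [h.1, pv_get_S] at hq; cases hq
        simp only [hq]
        by_cases hM : pvNormUpper t ck = "M"
        · have hS' : ¬ (pvNormUpper t ck = "S") := by intro h; rw [h, pv_get_S] at hq; cases hq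
          by_cases hv : pvNormUpper t nk ≠ "" ∧ pvNormStrip t dk ≠ ""
          · simp [hM, hv.1, hv.2, hS']
          · simp [hM, hv, hS']
        · have hS' : ¬ (pvNormUpper t ck = "S") := by intro h; rw [h, pv_get_S] at hq; cases hq
          by_cases hF : pvNormUpper t ck = "F"
          · simp [hM, hF, hS']
          · simp [hM, hF, hS']
    rw [hstep, ih (s + 1)]
    simp [List.append_assoc, List.foldl_cons]

-- every entry of the pending list has a nonnegative index
lemma pv_pend_nonneg (nk dk ck : String) (ts : List (List (String × String)))
    (p : Int × (String × String)) (hp : p ∈ pvPendOf nk dk ck 0 ts) : 0 ≤ p.1 := by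
  unfold pvPendOf at hp
  obtain ⟨a, ha, hfa⟩ := List.mem_filterMap.mp hp
  obtain ⟨k, hk, hak⟩ := (PySem.List.mem_enumerate_iff _ _ _).mp ha
  subst hak
  split_ifs at hfa with hc
  · have hpe := Option.some.inj hfa
    rw [← hpe]
    simp

-- the pending entry hit at position j
lemma pv_pend_any (nk dk ck : String) (ts : List (List (String × String)))
    (sk : PySem.Set (String × String)) (j : Nat) (hj : j < ts.length) :
    ((pvPendOf nk dk ck 0 ts).any
        (fun p => decide (p.1 = (j : Int)) && PySem.Set.contains sk p.2) = true) ↔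
      (pvNormUpper ts[j] ck = "M" ∧ pvNormUpper ts[j] nk ≠ "" ∧ pvNormStrip ts[j] dk ≠ "" ∧
        PySem.Set.contains sk (pvNormUpper ts[j] nk, pvNormStrip ts[j] dk) = true) := by
  rw [List.any_eq_true]
  constructor
  · rintro ⟨p, hp, hpred⟩
    simp only [Bool.and_eq_true, decide_eq_true_eq] at hpred
    unfold pvPendOf at hp
    obtain ⟨a, ha, hfa⟩ := List.mem_filterMap.mp hp
    obtain ⟨k, hk, hak⟩ := (PySem.List.mem_enumerate_iff _ _ _).mp ha
    subst hak
    split_ifs at hfa with hc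
    · have hpe := Option.some.inj hfa
      rw [← hpe] at hpred
      have h5 : (0 : Int) + (k : Nat) = (j : Nat) := hpred.1
      have hkj : k = j := by omega
      subst hkj
      exact ⟨hc.1, hc.2.1, hc.2.2, hpred.2⟩
  · rintro ⟨h1, h2, h3, h4⟩
    refine ⟨((j : Int), (pvNormUpper ts[j] nk, pvNormStrip ts[j] dk)), ?_, ?_⟩
    · unfold pvPendOf
      apply List.mem_filterMap.mpr
      refine ⟨((0 : Int) + (j : Nat), ts[j]), ?_, ?_⟩
      · exact (PySem.List.mem_enumerate_iff ts 0 ((0 : Int) + (j : Nat), ts[j])).mpr ⟨j, hj, rfl⟩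
      · simp [h1, h2, h3]
    · simp only [Bool.and_eq_true, decide_eq_true_eq]
      exact ⟨by simp, h4⟩

-- the fixup fold preserves length
lemma pv_patch_length (sk : PySem.Set (String × String)) (P : List (Int × (String × String))) :
    ∀ res : List String, (P.foldl (pvPatch sk) res).length = res.length := by
  induction P with
  | nil => intro res; rfl
  | cons p P ih =>
    intro res
    rw [List.foldl_cons, ih]
    unfold pvPatch
    split_ifs
    · exact PySem.List.length_pySetD res p.1 "exercise_sell"
    · rfl

-- pointwise value after the fixup fold
lemma pv_patch_getElem (sk : PySem.Set (String × String)) (P : List (Int × (String × String)))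
    (hP : ∀ p ∈ P, 0 ≤ p.1) :
    ∀ (res : List String) (j : Nat), j < res.length →
    (P.foldl (pvPatch sk) res)[j]? =
      (if P.any (fun p => decide (p.1 = (j : Int)) && PySem.Set.contains sk p.2) then
        some "exercise_sell" else res[j]?) := by
  induction P with
  | nil => intro res j hj; simp
  | cons p P ih =>
    intro res j hj
    have hp0 : 0 ≤ p.1 := hP p (List.mem_cons_self ..)
    rw [List.foldl_cons, List.any_cons]
    by_cases hc : PySem.Set.contains sk p.2 = true
    · have hpatch : pvPatch sk res p = res.set p.1.toNat "exercise_sell" := by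
        unfold pvPatch
        rw [if_pos hc, PySem.List.pySetD_of_nonneg res "exercise_sell" hp0]
      rw [hpatch]
      have hlen : j < (res.set p.1.toNat "exercise_sell").length := by
        rw [List.length_set]; exact hj
      rw [ih (fun q hq => hP q (List.mem_cons_of_mem p hq)) _ j hlen]
      by_cases hij : p.1 = (j : Int)
      · have hij' : p.1.toNat = j := by omega
        simp only [hij, decide_true, hc, Bool.and_self, Bool.true_or, if_pos]
        split_ifs with hany
        · rfl
        · simp [List.getElem?_set, hj]
      · have hij' : p.1.toNat ≠ j := by omega
        simp only [hij, decide_false, Bool.false_and, Bool.false_or]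
        simp [List.getElem?_set, hij']
    · have hpatch : pvPatch sk res p = res := by
        unfold pvPatch; rw [if_neg hc]
      rw [hpatch, ih (fun q hq => hP q (List.mem_cons_of_mem p hq)) _ j hj]
      have : (decide (p.1 = (j : Int)) && PySem.Set.contains sk p.2) = false := by
        rw [Bool.eq_false_iff]
        intro h; exact hc (Bool.and_elim_right h)
      rw [this, Bool.false_or]

-- all keys in the "S"-key set have nonempty components
lemma pv_sk_nonempty (nk dk ck : String) (ts : List (List (String × String))) :
    ∀ (sk : PySem.Set (String × String)), (∀ k ∈ sk, k.1 ≠ "" ∧ k.2 ≠ "") →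
    ∀ k ∈ ts.foldl (pvSkStep nk dk ck) sk, k.1 ≠ "" ∧ k.2 ≠ "" := by
  induction ts with
  | nil => intro sk h; simpa using h
  | cons t ts ih =>
    intro sk h
    rw [List.foldl_cons]
    apply ih
    intro k hk
    rw [pv_skStep_mem] at hk
    rcases hk with hk | hk
    · exact h k hk
    · rw [hk.2.2.2]
      exact ⟨hk.1, hk.2.1⟩

-- B's per-position value equals pvT of the "S"-key set
lemma pv_B_point (nk dk ck : String) (ts : List (List (String × String))) (j : Nat)
    (hj : j < ts.length) :
    (if (pvPendOf nk dk ck 0 ts).any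
          (fun p => decide (p.1 = (j : Int)) &&
            PySem.Set.contains (ts.foldl (pvSkStep nk dk ck) PySem.Set.empty) p.2) then
        some "exercise_sell"
      else some (pvG nk dk ck ts[j])) =
      some (pvT nk dk ck (ts.foldl (pvSkStep nk dk ck) PySem.Set.empty) ts[j]) := by
  have hany := pv_pend_any nk dk ck ts (ts.foldl (pvSkStep nk dk ck) PySem.Set.empty) j hj
  by_cases hA : (pvPendOf nk dk ck 0 ts).any
      (fun p => decide (p.1 = (j : Int)) &&
        PySem.Set.contains (ts.foldl (pvSkStep nk dk ck) PySem.Set.empty) p.2) = true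
  · obtain ⟨h1, h2, h3, h4⟩ := hany.mp hA
    rw [if_pos hA]
    unfold pvT
    rw [h1, pv_get_M]
    simp
    exact (PySem.Set.contains_iff _ _).mp h4
  · rw [if_neg hA]
    unfold pvG pvT
    cases hq : pvSimpleCodeMap.get? (pvNormUpper ts[j] ck) with
    | some v => rfl
    | none =>
      by_cases hM : pvNormUpper ts[j] ck = "M"
      · have hct : PySem.Set.contains (ts.foldl (pvSkStep nk dk ck) PySem.Set.empty)
            (pvNormUpper ts[j] nk, pvNormStrip ts[j] dk) = false := by
          rw [Bool.eq_false_iff]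
          intro h4
          by_cases hv : pvNormUpper ts[j] nk ≠ "" ∧ pvNormStrip ts[j] dk ≠ ""
          · exact hA (hany.mpr ⟨hM, hv.1, hv.2, h4⟩)
          · have hmem := (PySem.Set.contains_iff _ _).mp h4
            have hne := pv_sk_nonempty nk dk ck ts PySem.Set.empty
              (by intro k hk; simp [PySem.Set.empty] at hk) _ hmem
            push_neg at hv
            by_cases hn : pvNormUpper ts[j] nk = ""
            · exact hne.1 hn
            · exact hne.2 (hv hn)
        simp [hM, hct]
        intro hm
        have hc2 := (PySem.Set.contains_iff
          (ts.foldl (pvSkStep nk dk ck) PySem.Set.empty)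
          (pvNormUpper ts[j] nk, pvNormStrip ts[j] dk)).mpr hm
        rw [hct] at hc2
        cases hc2
      · simp [hM]

-- ===== VERDICT (by name: the statement is the Claim_ definition above) =====
set_option maxHeartbeats 1000000 in
theorem classify_trades_batch_spec : Claim_equal_classify_trades_batch := by
  intro trades nk dk ck _
  unfold Spec_classify_trades_batch
  rw [pv_A_map]
  unfold classify_trades_batch_alt
  rw [pv_loopB nk dk ck trades 0 [] [] PySem.Set.empty]
  simp only [List.nil_append]
  set sk := trades.foldl (pvSkStep nk dk ck) PySem.Set.empty with hsk
  set P := pvPendOf nk dk ck 0 trades with hP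
  have hlen : (P.foldl (pvPatch sk) (trades.map (pvG nk dk ck))).length = trades.length := by
    rw [pv_patch_length, List.length_map]
  symm
  apply List.ext_getElem?
  intro j
  by_cases hj : j < trades.length
  · have hfold := pv_patch_getElem sk P (pv_pend_nonneg nk dk ck trades)
      (trades.map (pvG nk dk ck)) j (by rw [List.length_map]; exact hj)
    show (P.foldl (fun res p => if PySem.Set.contains sk p.2 then PySem.List.pySetD res p.1 "exercise_sell" else res) (trades.map (pvG nk dk ck)))[j]? = _
    have hfold' : (P.foldl (fun res p => if PySem.Set.contains sk p.2 then PySem.List.pySetD res p.1 "exercise_sell" else res) (trades.map (pvG nk dk ck))) = P.foldl (pvPatch sk) (trades.map (pvG nk dk ck)) := rfl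
    rw [hfold', hfold]
    rw [List.getElem?_map, List.getElem?_eq_getElem hj]
    simp only [Option.map_some]
    rw [List.getElem?_map, List.getElem?_eq_getElem hj]
    exact pv_B_point nk dk ck trades j hj
  · have h1 : (P.foldl (pvPatch sk) (trades.map (pvG nk dk ck)))[j]? = none := by
      apply List.getElem?_eq_none
      rw [hlen]; omega
    have h2 : (trades.map (pvT nk dk ck sk))[j]? = none := by
      apply List.getElem?_eq_none
      rw [List.length_map]; omega
    show (P.foldl (fun res p => if PySem.Set.contains sk p.2 then PySem.List.pySetD res p.1 "exercise_sell" else res) (trades.map (pvG nk dk ck)))[j]? = _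
    rw [h2]
    exact h1
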